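-- pv_equiv track=rewrite | github.com/JojhanPerezArroyave/taller1Algoritmos | main.py | probabilidadesEstadosSiguientes
-- ===== SOURCE A (Python) =====
-- def probabilidadesEstadosSiguientes(canales: dict, estados: list) -> dict:
--     probabilidades = {estado: [0] * len(estados) for estado in estados}
--     num_tiempos = len(list(canales.values())[0])
--
--     for estado in estados:
--         for i in range(num_tiempos - 1):
--             if estado == "".join(canales[canal][i] for canal in canales):
--                 for j, estadoSiguiente in enumerate(estados):
--                     if estadoSiguiente == "".join(canales[canal][i + 1] for canal in canales):
--                         probabilidades[estado][j] += 1
--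
--     return probabilidades
-- ===== SOURCE B (Python) =====
-- def probabilidadesEstadosSiguientes(canales: dict, estados: list) -> dict:
--     series = list(canales.values())
--     num_tiempos = min(len(serie) for serie in series)
--     compuestos = ["".join(serie[i] for serie in series) for i in range(num_tiempos)]
--     transiciones = {}
--     for par in zip(compuestos, compuestos[1:]):
--         transiciones[par] = transiciones.get(par, 0) + 1
--     probabilidades = {estado: [0] * len(estados) for estado in estados}
--     for estado in estados:
--         probabilidades[estado] = [c + transiciones.get((estado, siguiente), 0)
--                                   for c, siguiente in zip(probabilidades[estado], estados)]
--     return probabilidades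
-- ===== Notes on version B (the rewrite author's own statement) =====
-- stated objective: faster
-- what changed: B precomputes the composite state per time step once and counts transitions in a single pass into a dict, then builds each row by adding the looked-up counts, instead of re-joining all channels for every (estado, time, next-estado) triple; Pre_ excludes exactly the inputs on which A raises (empty canales, or channels too short for the windows A indexes).
import Mathlib
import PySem

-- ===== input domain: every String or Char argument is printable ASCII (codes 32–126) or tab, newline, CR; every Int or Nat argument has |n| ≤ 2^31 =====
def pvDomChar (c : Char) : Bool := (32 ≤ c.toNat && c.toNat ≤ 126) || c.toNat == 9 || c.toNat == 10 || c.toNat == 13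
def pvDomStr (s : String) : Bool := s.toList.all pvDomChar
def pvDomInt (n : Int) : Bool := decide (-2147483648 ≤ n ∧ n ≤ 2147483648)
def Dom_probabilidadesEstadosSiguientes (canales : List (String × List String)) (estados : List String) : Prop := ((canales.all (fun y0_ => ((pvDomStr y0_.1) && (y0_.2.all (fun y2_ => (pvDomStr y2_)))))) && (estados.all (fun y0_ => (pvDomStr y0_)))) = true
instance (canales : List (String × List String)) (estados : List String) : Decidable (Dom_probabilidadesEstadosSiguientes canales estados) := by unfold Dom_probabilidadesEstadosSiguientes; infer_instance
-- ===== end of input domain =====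

-- B replaces A's per-(estado, time, next-estado) channel re-joins by one pass of composite states
-- and a transition-count dict (objective: faster; asymptotic change, measured).

-- ===== PORT A =====
-- "".join(canales[canal][i] for canal in canales): iterate the keys, first-match lookup, index i
-- (pyGetD's "" default is only reachable outside Pre_, where the Python raises IndexError)
def pvEstadoCompuesto (canales : List (String × List String)) (i : Int) : String :=
  PySem.Str.join "" (canales.map (fun p => PySem.List.pyGetD ((PySem.Dict.mk canales).getD p.1 []) i ""))

-- probabilidades[estado][j] += 1 : j comes from enumerate, so 0 ≤ j and .toNat is exact;
-- j < len(row) by construction, so List.set is Python's in-range element assignment here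
def pvInc (row : List Int) (j : Int) : List Int :=
  row.set j.toNat (PySem.List.pyGetD row j 0 + 1)

def probabilidadesEstadosSiguientes (canales : List (String × List String)) (estados : List String) : List (String × List Int) :=
  let probabilidades := estados.foldl (fun d estado => d.insert estado (List.replicate estados.length 0)) PySem.Dict.empty
  let num_tiempos : Int := ((PySem.List.pyGet? (canales.map Prod.snd) 0).getD []).length
  (estados.foldl (fun d estado =>
    (PySem.List.pyRange 0 (num_tiempos - 1)).foldl (fun d i =>
      if estado == pvEstadoCompuesto canales i then
        (PySem.List.enumerate estados).foldl (fun d je =>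
          if je.2 == pvEstadoCompuesto canales (i + 1) then
            d.modify estado [] (fun row => pvInc row je.1)
          else d) d
      else d) d) probabilidades).items

-- ===== PORT B =====
def probabilidadesEstadosSiguientes_alt (canales : List (String × List String)) (estados : List String) : List (String × List Int) :=
  let series := canales.map Prod.snd
  -- min(len(serie) for serie in series); the .getD 0 default is only reachable outside Pre_
  -- (empty canales), where the Python raises ValueError
  let num_tiempos : Int := (PySem.List.min? (series.map (fun serie => (serie.length : Int))) (fun x => x)).getD 0
  let compuestos := (PySem.List.pyRange 0 num_tiempos).map
    (fun i => PySem.Str.join "" (series.map (fun serie => PySem.List.pyGetD serie i "")))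
  let transiciones := (compuestos.zip (PySem.List.slice compuestos (some 1))).foldl
    (fun d par => d.insert par (d.getD par 0 + 1)) PySem.Dict.empty
  let probabilidades := estados.foldl (fun d estado => d.insert estado (List.replicate estados.length 0)) PySem.Dict.empty
  (estados.foldl (fun d estado =>
    d.insert estado (((d.getD estado []).zip estados).map
      (fun cs => cs.1 + transiciones.getD (estado, cs.2) 0))) probabilidades).items

-- ===== PRECONDITION & SPEC =====
-- the composite state read directly off the channel values at time i (used only by Pre_)
def pvComposite (canales : List (String × List String)) (i : Int) : String :=
  PySem.Str.join "" ((canales.map Prod.snd).map (fun serie => PySem.List.pyGetD serie i ""))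

-- Pre_ also asks for distinct channel names (automatic for an argument that was a Python dict);
-- beyond that it excludes exactly the inputs on which A raises: empty canales
-- (IndexError on values()[0]), a channel more than one step shorter than the first (IndexError in
-- the window join once estados is nonempty and there are ≥ 2 time steps), and a channel exactly one
-- step shorter when some estado matches the composite state of the last full time step (IndexError
-- in the inner join).
def Pre_probabilidadesEstadosSiguientes (canales : List (String × List String)) (estados : List String) : Prop :=
  canales ≠ [] ∧ (canales.map Prod.fst).Nodup ∧
    (estados = [] ∨ ((canales.map Prod.snd).headD []).length ≤ 1 ∨
      ((∀ p ∈ canales, ((canales.map Prod.snd).headD []).length - 1 ≤ p.2.length) ∧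
        ((∃ p ∈ canales, p.2.length = ((canales.map Prod.snd).headD []).length - 1) →
          ∀ e ∈ estados, e ≠ pvComposite canales ((((canales.map Prod.snd).headD []).length : Int) - 2))))
instance (canales : List (String × List String)) (estados : List String) : Decidable (Pre_probabilidadesEstadosSiguientes canales estados) := by unfold Pre_probabilidadesEstadosSiguientes; infer_instance

def pvWitness_probabilidadesEstadosSiguientes : (List (String × List String)) × List String :=
  ([("c1", ["a", "b", "a"]), ("c2", ["x", "x", "y"])], ["ax", "bx", "ay"])

def Spec_probabilidadesEstadosSiguientes (canales : List (String × List String)) (estados : List String) (out : List (String × List Int)) : Prop := out = probabilidadesEstadosSiguientes_alt canales estados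
instance (canales : List (String × List String)) (estados : List String) (out : List (String × List Int)) : Decidable (Spec_probabilidadesEstadosSiguientes canales estados out) := by unfold Spec_probabilidadesEstadosSiguientes; infer_instance

-- ===== CLAIM (what is proved, stated in full; the proofs are below) =====
def Claim_equal_probabilidadesEstadosSiguientes : Prop := ∀ (canales : List (String × List String)) (estados : List String), Dom_probabilidadesEstadosSiguientes canales estados → Pre_probabilidadesEstadosSiguientes canales estados → Spec_probabilidadesEstadosSiguientes canales estados (probabilidadesEstadosSiguientes canales estados)

-- ===== LEMMAS AND PROOFS =====

-- a fold whose every step acts (w.r.t. getD) only on the row stored at key e is, seen through getD,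
-- the corresponding fold on that row
theorem pv_foldl_localized {α : Type} (l : List α)
    (T : PySem.Dict String (List Int) → α → PySem.Dict String (List Int))
    (t : List Int → α → List Int) (e : String)
    (h : ∀ d x k, (T d x).getD k [] = if k = e then t (d.getD e []) x else d.getD k []) :
    ∀ (d : PySem.Dict String (List Int)) (k : String),
      (l.foldl T d).getD k [] = if k = e then l.foldl t (d.getD e []) else d.getD k [] := by
  induction l with
  | nil => intro d k; by_cases hk : k = e <;> simp [hk]
  | cons a l ih =>
    intro d k
    simp only [List.foldl_cons]
    rw [ih, h]
    by_cases hk : k = e <;> simp [hk, h]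

-- over any key list, the fold applies the local transformation at key e once per occurrence of e
theorem pv_foldl_getD_count {β : Type} (l : List String)
    (F : PySem.Dict String β → String → PySem.Dict String β) (dflt : β)
    (G : String → β → β)
    (hF : ∀ d x k, (F d x).getD k dflt = if k = x then G x (d.getD x dflt) else d.getD k dflt)
    (e : String) :
    ∀ d, (l.foldl F d).getD e dflt = (G e)^[l.count e] (d.getD e dflt) := by
  induction l with
  | nil => intro d; simp
  | cons a l ih =>
    intro d
    simp only [List.foldl_cons]
    rw [ih, hF]
    by_cases ha : e = a
    · subst ha
      simp only [List.count_cons_self, Function.iterate_succ_apply, if_true]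
    · rw [if_neg ha]
      rw [List.count_cons_of_ne (fun h => ha h.symm)]

-- iterating a constant map at least once yields the constant
theorem pv_iterate_const {β : Type} (k : β) (c : Nat) (hc : 1 ≤ c) (x : β) :
    (fun (_ : β) => k)^[c] x = k := by
  cases c with
  | zero => omega
  | succ n => rw [Function.iterate_succ_apply']

-- a fold whose steps preserve the key list preserves it globally
theorem pv_foldl_keys_fixed {α β : Type} (l : List α)
    (T : PySem.Dict String β → α → PySem.Dict String β) (K : List String)
    (hT : ∀ d x, x ∈ l → d.keys = K → (T d x).keys = K) :
    ∀ d, d.keys = K → (l.foldl T d).keys = K := by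
  induction l with
  | nil => intro d h; simpa using h
  | cons a l ih =>
    intro d h
    simp only [List.foldl_cons]
    exact ih (fun d x hx => hT d x (List.mem_cons_of_mem _ hx)) _
      (hT d a List.mem_cons_self h)

-- the enumerate-fold of conditional in-place increments is a by-value map bump on the suffix
theorem pv_enum_row (s : String) :
    ∀ (xs : List String) (k : Int) (g : String → Int) (p : List Int), 0 ≤ k → p.length = k.toNat →
    (PySem.List.enumerate xs k).foldl (fun r je => if je.2 == s then pvInc r je.1 else r) (p ++ xs.map g)
      = p ++ xs.map (fun t => if t == s then g t + 1 else g t) := by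
  intro xs
  induction xs with
  | nil => intro k g p _ _; simp [PySem.List.enumerate]
  | cons x xs ih =>
    intro k g p hk hp
    simp only [PySem.List.enumerate, List.foldl_cons, List.map_cons]
    have hstep : (if x == s then pvInc (p ++ (g x :: xs.map g)) k else (p ++ (g x :: xs.map g)))
        = p ++ ((if x == s then g x + 1 else g x) :: xs.map g) := by
      by_cases hxs : x = s
      · subst hxs
        simp only [BEq.rfl, if_true, pvInc]
        have hget : PySem.List.pyGetD (p ++ (g x :: xs.map g)) k 0 = g x := by
          rw [PySem.List.pyGetD_eq_getElem _ _ hk (by simp; omega)]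
          rw [List.getElem_append_right (by omega)]
          simp [hp]
        rw [hget, List.set_append]
        simp [hp]
      · simp [hxs]
    rw [hstep]
    have : p ++ ((if x == s then g x + 1 else g x) :: xs.map g)
        = (p ++ [if x == s then g x + 1 else g x]) ++ xs.map g := by simp
    rw [this, ih (k + 1) g _ (by omega) (by simp [hp]; omega)]
    simp

-- the range-fold of enumerate-folds computes, per estado value t, the transition count
theorem pv_range_row (estados : List String) (S : Int → String) (e : String) :
    ∀ (l : List Int) (g : String → Int),
    l.foldl (fun r i => if e == S i then
        (PySem.List.enumerate estados).foldl (fun r je => if je.2 == S (i + 1) then pvInc r je.1 else r) r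
      else r) (estados.map g)
      = estados.map (fun t => g t + ((l.countP (fun i => e == S i && S (i + 1) == t) : Nat) : Int)) := by
  intro l
  induction l with
  | nil => intro g; simp
  | cons i l ih =>
    intro g
    simp only [List.foldl_cons]
    by_cases hc : e = S i
    · rw [if_pos (by simp [hc])]
      rw [show estados.map g = [] ++ estados.map g by simp]
      rw [pv_enum_row (S (i + 1)) estados 0 g [] (le_refl 0) rfl]
      simp only [List.nil_append]
      rw [ih]
      apply List.map_congr_left
      intro t _
      have hcnt : (i :: l).countP (fun i => e == S i && S (i + 1) == t)
          = ((if S (i + 1) = t then 1 else 0) + l.countP (fun i => e == S i && S (i + 1) == t)) := by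
        rw [List.countP_cons]
        by_cases ht : S (i + 1) = t
        · simp [ht, hc]; omega
        · simp [ht, hc]
      rw [hcnt]
      push_cast
      by_cases ht : t = S (i + 1)
      · subst ht
        simp
        ring
      · have ht' : ¬ (S (i + 1) = t) := fun h => ht h.symm
        simp [ht, ht']
    · rw [if_neg (by simp [hc])]
      rw [ih]
      apply List.map_congr_left
      intro t _
      have : (i :: l).countP (fun i => e == S i && S (i + 1) == t)
          = l.countP (fun i => e == S i && S (i + 1) == t) := by
        rw [List.countP_cons]; simp [hc]
      rw [this]

-- iterating the time loop once per occurrence of e scales the counted transitions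
theorem pv_row_iter (estados : List String) (S : Int → String) (e : String) (l : List Int) :
    ∀ (c : Nat) (g : String → Int),
    (fun r => l.foldl (fun r i => if e == S i then
        (PySem.List.enumerate estados).foldl (fun r je => if je.2 == S (i + 1) then pvInc r je.1 else r) r
      else r) r)^[c] (estados.map g)
      = estados.map (fun t => g t + (c : Int) * ((l.countP (fun i => e == S i && S (i + 1) == t) : Nat) : Int)) := by
  intro c
  induction c with
  | zero => intro g; simp
  | succ c ih =>
    intro g
    rw [Function.iterate_succ_apply]
    rw [pv_range_row estados S e l g, ih]
    apply List.map_congr_left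
    intro t _
    push_cast
    ring

-- one zip-map accumulation step, row given by value
theorem pv_zipmap_step (K : String → Int) :
    ∀ (l : List String) (g : String → Int),
    ((l.map g).zip l).map (fun cs => cs.1 + K cs.2) = l.map (fun s => g s + K s) := by
  intro l
  induction l with
  | nil => intro g; simp
  | cons a l ih => intro g; simp [ih]

-- iterating the zip-map accumulation scales the added counts
theorem pv_zipmap_iter (estados : List String) (K : String → Int) :
    ∀ (c : Nat) (g : String → Int),
    (fun row => ((row.zip estados).map (fun cs => cs.1 + K cs.2)))^[c] (estados.map g)
      = estados.map (fun s => g s + (c : Int) * K s) := by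
  intro c
  induction c with
  | zero => intro g; simp
  | succ c ih =>
    intro g
    rw [Function.iterate_succ_apply]
    simp only [pv_zipmap_step K estados g]
    rw [ih]
    apply List.map_congr_left
    intro t _
    push_cast
    ring

-- consecutive pairs of a map over range
theorem pv_zip_shift {β : Type} (f : Nat → β) (m : Nat) :
    ((List.range (m + 1)).map f).zip (((List.range (m + 1)).map f).drop 1)
      = (List.range m).map (fun i => (f i, f (i + 1))) := by
  apply List.ext_getElem
  · simp
  · intro i h1 h2
    simp only [List.getElem_zip, List.getElem_map, List.getElem_drop, List.getElem_range]
    have h : 1 + i = i + 1 := by omega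
    simp [h]

-- A's composite state equals B's (first-match lookup of a Nodup-keyed dict is the pair's own value)
theorem pv_estado_eq (canales : List (String × List String)) (hkn : (canales.map Prod.fst).Nodup) (i : Int) :
    pvEstadoCompuesto canales i
      = PySem.Str.join "" ((canales.map Prod.snd).map (fun serie => PySem.List.pyGetD serie i "")) := by
  unfold pvEstadoCompuesto
  rw [List.map_map]
  congr 1
  apply List.map_congr_left
  intro p hp
  have hmem : (p.1, p.2) ∈ (PySem.Dict.mk canales).items := by simpa using hp
  have hnd : (PySem.Dict.mk canales).keys.Nodup := by
    simpa [PySem.Dict.keys] using hkn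
  simp [PySem.Dict.getD_of_mem_items _ hmem hnd]

-- countP over range drops a final index at which the predicate is false
theorem pv_countP_range_succ (p : Nat → Bool) (m : Nat) (h : p m = false) :
    (List.range (m + 1)).countP p = (List.range m).countP p := by
  rw [List.range_succ, List.countP_append]
  simp [h]

-- the head of values, as A and B read it
theorem pv_head_values (xs : List (List String)) (d : List String) :
    (PySem.List.pyGet? xs 0).getD d = xs.headD d := by
  cases xs <;> simp [PySem.List.pyGet?, PySem.List.pyIdx?]

-- ===== VERDICT (by name: the statement is the Claim_ definition above) =====
theorem probabilidadesEstadosSiguientes_spec : Claim_equal_probabilidadesEstadosSiguientes := by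
  intro canales estados _ hPre
  obtain ⟨hne, hkn, hdisj⟩ := hPre
  unfold Spec_probabilidadesEstadosSiguientes
  by_cases hes : estados = []
  · subst hes; rfl
  unfold probabilidadesEstadosSiguientes probabilidadesEstadosSiguientes_alt
  simp only [pv_head_values]
  set n0 : Nat := ((List.map Prod.snd canales).headD []).length with hn0
  -- the min over the series lengths that B uses
  have hser : (List.map Prod.snd canales) ≠ [] := by
    intro h; exact hne (List.map_eq_nil_iff.mp h)
  obtain ⟨v, hv⟩ : ∃ v, PySem.List.min?
      ((List.map Prod.snd canales).map (fun serie => (serie.length : Int))) (fun x => x) = some v := by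
    rcases h : PySem.List.min?
        ((List.map Prod.snd canales).map (fun serie => (serie.length : Int))) (fun x => x) with _ | v
    · exact absurd ((PySem.List.min?_eq_none_iff _ _).mp h) (by simpa using hser)
    · exact ⟨v, h⟩
  obtain ⟨w, hw, hwmem⟩ : ∃ w : Nat, v = (w : Int) ∧
      ∃ sv ∈ List.map Prod.snd canales, sv.length = w := by
    obtain ⟨sv, hsvmem, hveq⟩ := List.mem_map.mp (PySem.List.min?_mem hv)
    exact ⟨sv.length, hveq.symm, sv, hsvmem, rfl⟩
  have hn0mem : ((n0 : Nat) : Int) ∈ (List.map Prod.snd canales).map (fun serie => (serie.length : Int)) := by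
    have : (List.map Prod.snd canales).headD [] ∈ List.map Prod.snd canales := by
      cases h : List.map Prod.snd canales with
      | nil => exact absurd h hser
      | cons a t => simp
    exact List.mem_map_of_mem this
  have hvle : v ≤ ((n0 : Nat) : Int) := PySem.List.min?_isMin hv _ hn0mem
  have hwbound : w = n0 ∨ (w ≤ 1 ∧ n0 ≤ 1) ∨
      (n0 = w + 1 ∧ 1 ≤ w ∧ ∀ e' ∈ estados, e' ≠ pvComposite canales ((n0 : Int) - 2)) := by
    rcases hdisj with h | hn1 | ⟨hlen, hshort⟩
    · exact absurd h hes
    · right; left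
      refine ⟨?_, hn1⟩
      rw [hw] at hvle; omega
    · obtain ⟨sv, hsvmem, hsvlen⟩ := hwmem
      obtain ⟨p, hpmem, hpsnd⟩ := List.mem_map.mp hsvmem
      have h1 : n0 - 1 ≤ sv.length := by rw [← hpsnd] at hsvmem ⊢; exact hlen p hpmem
      have h2 : w ≤ n0 := by rw [hw] at hvle; omega
      by_cases hwn : w = n0
      · exact Or.inl hwn
      · by_cases hw0 : w = 0
        · right; left; omega
        · right; right
          refine ⟨by omega, by omega, hshort ⟨p, hpmem, by rw [hpsnd]; omega⟩⟩
  rw [hv]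
  simp only [Option.getD_some]
  rw [hw]
  -- B's composite-state function is A's pvEstadoCompuesto (Nodup keys: first-match lookup = own value)
  have hcf : (fun i => PySem.Str.join ""
        (List.map (fun serie => PySem.List.pyGetD serie i "") (List.map Prod.snd canales)))
      = (fun i => pvEstadoCompuesto canales i) :=
    funext fun i => (pv_estado_eq canales hkn i).symm
  rw [hcf]
  -- the composite-state time series and its consecutive pairs
  have hcomp : (PySem.List.pyRange 0 ((w : Int))).map (fun i => pvEstadoCompuesto canales i)
      = (List.range w).map (fun (k : Nat) => pvEstadoCompuesto canales (k : Int)) := by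
    rw [PySem.List.pyRange_zero_natCast, List.map_map]; rfl
  have hpairs : ((PySem.List.pyRange 0 ((w : Int))).map (fun i => pvEstadoCompuesto canales i)).zip
        (PySem.List.slice ((PySem.List.pyRange 0 ((w : Int))).map (fun i => pvEstadoCompuesto canales i)) (some 1))
      = (List.range (w - 1)).map
          (fun (k : Nat) => (pvEstadoCompuesto canales (k : Int), pvEstadoCompuesto canales ((k : Int) + 1))) := by
    rw [PySem.List.slice_from _ (by norm_num : (0:Int) ≤ 1), hcomp]
    cases w with
    | zero => simp
    | succ m =>
      have h1 : ((1 : Int)).toNat = 1 := rfl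
      rw [h1, pv_zip_shift (fun (k : Nat) => pvEstadoCompuesto canales (k : Int)) m]
      simp only [Nat.add_sub_cancel]
      apply List.map_congr_left
      intro k _
      have : ((k + 1 : Nat) : Int) = (k : Int) + 1 := by push_cast; ring
      rw [this]
  rw [hpairs]
  set TD : PySem.Dict (String × String) Int := (((List.range (w - 1)).map (fun (k : Nat) =>
      (pvEstadoCompuesto canales (k : Int), pvEstadoCompuesto canales ((k : Int) + 1)))).foldl
    (fun d par => d.insert par (d.getD par 0 + 1)) PySem.Dict.empty) with hTD
  -- the transition dict is a counter over the pair list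
  have htrans : ∀ (L : List (String × String)) (e t : String),
      (L.foldl (fun d par => d.insert par (d.getD par 0 + 1)) PySem.Dict.empty).getD (e, t) 0
        = ((L.count (e, t) : Nat) : Int) := by
    intro L e t
    rw [PySem.Dict.getD_foldl_insert_add_one, PySem.Dict.getD_empty]
    simp
  -- getD through the enumerate-level loop
  have hEnum : ∀ (estado sN : String) (d : PySem.Dict String (List Int)) (k : String),
      ((PySem.List.enumerate estados).foldl
          (fun d je => if (je.2 == sN) = true then d.modify estado [] (fun row => pvInc row je.1) else d) d).getD k []
        = if k = estado then
            (PySem.List.enumerate estados).foldl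
              (fun r je => if (je.2 == sN) = true then pvInc r je.1 else r) (d.getD estado [])
          else d.getD k [] := by
    intro estado sN d k
    refine pv_foldl_localized _ _ _ estado ?_ d k
    intro d x k
    by_cases hx : (x.2 == sN) = true
    · simp only [hx, if_true]
      rw [PySem.Dict.getD_modify]
    · simp only [hx]
      by_cases hk : k = estado <;> simp [hk]
  -- getD through the time loop
  have hRange : ∀ (estado : String) (d : PySem.Dict String (List Int)) (k : String),
      ((PySem.List.pyRange 0 ((n0 : Int) - 1)).foldl
          (fun d i => if (estado == pvEstadoCompuesto canales i) = true then
              (PySem.List.enumerate estados).foldl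
                (fun d je => if (je.2 == pvEstadoCompuesto canales (i + 1)) = true then
                    d.modify estado [] (fun row => pvInc row je.1)
                  else d) d
            else d) d).getD k []
        = if k = estado then
            (PySem.List.pyRange 0 ((n0 : Int) - 1)).foldl
              (fun r i => if (estado == pvEstadoCompuesto canales i) = true then
                  (PySem.List.enumerate estados).foldl
                    (fun r je => if (je.2 == pvEstadoCompuesto canales (i + 1)) = true then pvInc r je.1 else r) r
                else r) (d.getD estado [])
          else d.getD k [] := by
    intro estado d k
    refine pv_foldl_localized _ _ _ estado ?_ d k
    intro d i k
    by_cases hc : (estado == pvEstadoCompuesto canales i) = true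
    · simp only [hc, if_true]
      exact hEnum estado (pvEstadoCompuesto canales (i + 1)) d k
    · simp only [hc]
      by_cases hk : k = estado <;> simp [hk]
  -- the initial dict: keys and rows
  have hPkeys : (estados.foldl (fun d estado => d.insert estado (List.replicate estados.length (0 : Int)))
      PySem.Dict.empty).keys = PySem.Set.ofList estados := by
    rw [PySem.Dict.keys_foldl_insert estados (fun _ _ => List.replicate estados.length (0 : Int)) PySem.Dict.empty]
    rfl
  have hProw : ∀ e ∈ estados,
      (estados.foldl (fun d estado => d.insert estado (List.replicate estados.length (0 : Int)))
        PySem.Dict.empty).getD e [] = List.replicate estados.length (0 : Int) := by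
    intro e he
    rw [pv_foldl_getD_count estados _ [] (fun _ _ => List.replicate estados.length (0 : Int))
      (fun d x k => by rw [PySem.Dict.getD_insert]) e _]
    exact pv_iterate_const _ _ (List.count_pos_iff.mpr he) _
  -- keys are preserved by the whole main loop
  have hcont : ∀ (d : PySem.Dict String (List Int)) (estado : String),
      d.keys = PySem.Set.ofList estados → estado ∈ estados → d.contains estado = true := by
    intro d estado hk he
    rw [PySem.Dict.contains_eq_decide_mem_keys, hk]
    simpa [PySem.Set.mem_ofList] using he
  have hFkeys : ∀ (d : PySem.Dict String (List Int)) (estado : String), estado ∈ estados →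
      d.keys = PySem.Set.ofList estados →
      ((PySem.List.pyRange 0 ((n0 : Int) - 1)).foldl
          (fun d i => if (estado == pvEstadoCompuesto canales i) = true then
              (PySem.List.enumerate estados).foldl
                (fun d je => if (je.2 == pvEstadoCompuesto canales (i + 1)) = true then
                    d.modify estado [] (fun row => pvInc row je.1)
                  else d) d
            else d) d).keys = PySem.Set.ofList estados := by
    intro d estado hmem hk
    refine pv_foldl_keys_fixed _ _ (PySem.Set.ofList estados) ?_ d hk
    intro d i _ hk
    by_cases hc : (estado == pvEstadoCompuesto canales i) = true
    · simp only [hc, if_true]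
      refine pv_foldl_keys_fixed _ _ (PySem.Set.ofList estados) ?_ d hk
      intro d je _ hk
      by_cases hj : (je.2 == pvEstadoCompuesto canales (i + 1)) = true
      · simp only [hj, if_true]
        rw [PySem.Dict.keys_modify, PySem.Dict.keys_insert_of_contains _ _ (hcont d estado hk hmem)]
        exact hk
      · simp only [hj]; exact hk
    · simp only [hc]; exact hk
  have hkeysF : (estados.foldl (fun d estado =>
      (PySem.List.pyRange 0 ((n0 : Int) - 1)).foldl
        (fun d i => if (estado == pvEstadoCompuesto canales i) = true then
            (PySem.List.enumerate estados).foldl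
              (fun d je => if (je.2 == pvEstadoCompuesto canales (i + 1)) = true then
                  d.modify estado [] (fun row => pvInc row je.1)
                else d) d
          else d) d)
      (estados.foldl (fun d estado => d.insert estado (List.replicate estados.length 0))
        PySem.Dict.empty)).keys = PySem.Set.ofList estados :=
    pv_foldl_keys_fixed estados _ (PySem.Set.ofList estados) (fun d x hx hk => hFkeys d x hx hk) _ hPkeys
  -- items of both sides as maps over estados
  have hitemsA := PySem.Dict.items_eq_map_keys
    (estados.foldl (fun d estado =>
      (PySem.List.pyRange 0 ((n0 : Int) - 1)).foldl
        (fun d i => if (estado == pvEstadoCompuesto canales i) = true then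
            (PySem.List.enumerate estados).foldl
              (fun d je => if (je.2 == pvEstadoCompuesto canales (i + 1)) = true then
                  d.modify estado [] (fun row => pvInc row je.1)
                else d) d
          else d) d)
      (estados.foldl (fun d estado => d.insert estado (List.replicate estados.length 0))
        PySem.Dict.empty)) (by rw [hkeysF]; exact PySem.Set.nodup_ofList estados) []
  rw [hkeysF] at hitemsA
  have hBkeys : (estados.foldl (fun d estado => d.insert estado
        (((d.getD estado []).zip estados).map (fun cs => cs.1 + TD.getD (estado, cs.2) 0)))
      (estados.foldl (fun d estado => d.insert estado (List.replicate estados.length 0))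
        PySem.Dict.empty)).keys = PySem.Set.ofList estados := by
    refine pv_foldl_keys_fixed _ _ _ ?_ _ hPkeys
    intro d x hx hk
    rw [PySem.Dict.keys_insert_of_contains _ _ (hcont d x hk hx)]
    exact hk
  have hitemsB := PySem.Dict.items_eq_map_keys
    (estados.foldl (fun d estado => d.insert estado
        (((d.getD estado []).zip estados).map (fun cs => cs.1 + TD.getD (estado, cs.2) 0)))
      (estados.foldl (fun d estado => d.insert estado (List.replicate estados.length 0))
        PySem.Dict.empty)) (by rw [hBkeys]; exact PySem.Set.nodup_ofList estados) ([] : List Int)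
  rw [hBkeys] at hitemsB
  rw [hitemsA, hitemsB]
  have hBrow : ∀ e ∈ estados, (estados.foldl (fun d estado => d.insert estado
        (((d.getD estado []).zip estados).map (fun cs => cs.1 + TD.getD (estado, cs.2) 0)))
      (estados.foldl (fun d estado => d.insert estado (List.replicate estados.length 0))
        PySem.Dict.empty)).getD e []
      = estados.map (fun s => ((estados.count e : Nat) : Int) * TD.getD (e, s) 0) := by
    intro e he
    rw [pv_foldl_getD_count estados _ []
      (fun x row => ((row.zip estados).map (fun cs => cs.1 + TD.getD (x, cs.2) 0)))
      (fun d x k => by rw [PySem.Dict.getD_insert]) e _]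
    rw [hProw e he, ← List.map_const' (l := estados) (b := (0 : Int))]
    rw [pv_zipmap_iter estados (fun s => TD.getD (e, s) 0) (estados.count e) (fun _ => 0)]
    simp
  -- rowwise equality
  apply List.map_congr_left
  intro e heE
  have he : e ∈ estados := (PySem.Set.mem_ofList estados e).mp heE
  simp only [Prod.mk.injEq, true_and]
  rw [hBrow e he]
  rw [pv_foldl_getD_count estados _ []
    (fun estado r =>
      (PySem.List.pyRange 0 ((n0 : Int) - 1)).foldl
        (fun r i => if (estado == pvEstadoCompuesto canales i) = true then
            (PySem.List.enumerate estados).foldl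
              (fun r je => if (je.2 == pvEstadoCompuesto canales (i + 1)) = true then pvInc r je.1 else r) r
          else r) r)
    (fun d x k => hRange x d k) e _]
  rw [hProw e he, ← List.map_const' (l := estados) (b := (0 : Int))]
  rw [pv_row_iter estados (fun i => pvEstadoCompuesto canales i) e
    (PySem.List.pyRange 0 ((n0 : Int) - 1)) (estados.count e) (fun _ => 0)]
  apply List.map_congr_left
  intro t _
  rw [hTD, htrans]
  simp only [zero_add]
  congr 1
  -- the transition counts agree
  rcases hwbound with rfl | ⟨hw1, hn1⟩ | ⟨hn0w, hw1, hnm⟩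
  · rw [List.count_eq_countP, List.countP_map]
    cases n0 with
    | zero =>
      have h0 : ((0 : Nat) : Int) - 1 = -1 := by norm_num
      rw [h0]
      have : PySem.List.pyRange 0 (-1) = [] := by decide
      rw [this]
      simp
    | succ m =>
      have h1 : ((m + 1 : Nat) : Int) - 1 = ((m : Nat) : Int) := by push_cast; ring
      rw [h1, PySem.List.pyRange_zero_natCast, List.countP_map, Nat.add_sub_cancel]
      congr 1
      apply List.countP_congr
      intro k _
      simp only [Function.comp_apply, Bool.and_eq_true, beq_iff_eq, Prod.mk.injEq]
      constructor
      · rintro ⟨h1, h2⟩; exact ⟨h1.symm, h2⟩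
      · rintro ⟨h1, h2⟩; exact ⟨h1.symm, h2⟩
  · have hw0 : w - 1 = 0 := by omega
    have hemp : PySem.List.pyRange 0 ((n0 : Int) - 1) = [] := by
      apply List.eq_nil_iff_forall_not_mem.mpr
      intro x hx
      have := PySem.List.mem_pyRange_one.mp hx
      omega
    rw [hw0, hemp]
    simp
  · -- one channel exactly one step short: by Pre_, A's last window matches no estado,
    -- so A's extra time step contributes nothing and the counts over the first w steps agree
    have hef : (e == pvEstadoCompuesto canales (((w - 1 : Nat) : Int))) = false := by
      have hcast : ((w - 1 : Nat) : Int) = (n0 : Int) - 2 := by omega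
      rw [hcast]
      refine beq_eq_false_iff_ne.mpr ?_
      rw [pv_estado_eq canales hkn]
      exact hnm e he
    have hnn : (n0 : Int) - 1 = ((w : Nat) : Int) := by omega
    rw [hnn, PySem.List.pyRange_zero_natCast, List.countP_map]
    rw [show w = (w - 1) + 1 by omega,
        pv_countP_range_succ _ _ (by simp [Function.comp, hef])]
    rw [List.count_eq_countP, List.countP_map]
    have hww : (w - 1) + 1 - 1 = w - 1 := by omega
    rw [hww]
    congr 1
    apply List.countP_congr
    intro k _
    simp only [Function.comp_apply, Bool.and_eq_true, beq_iff_eq, Prod.mk.injEq]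
    constructor
    · rintro ⟨h1, h2⟩; exact ⟨h1.symm, h2⟩
    · rintro ⟨h1, h2⟩; exact ⟨h1.symm, h2⟩
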